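-- pv_equiv track=rewrite | github.com/yalisommer/DAND | latent_viz.py | get_boundary_edges
-- ===== SOURCE A (Python) =====
-- def get_boundary_edges(nx=4, ny=4):
--     """Get ordered perimeter edges of an nx×ny quad grid (vertex grid is (nx+1)×(ny+1))."""
--     nvx = nx + 1
--     boundary_edges = []
--     for i in range(nx):
--         boundary_edges.append((i, i + 1))
--     for j in range(ny):
--         boundary_edges.append((j * nvx + nx, (j + 1) * nvx + nx))
--     for i in range(nx, 0, -1):
--         boundary_edges.append((ny * nvx + i, ny * nvx + i - 1))
--     for j in range(ny, 0, -1):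
--         boundary_edges.append((j * nvx, (j - 1) * nvx))
--     return boundary_edges
-- ===== SOURCE B (Python) =====
-- def get_boundary_edges(nx=4, ny=4):
--     """Get ordered perimeter edges by walking the boundary vertex path once,
--     then pairing adjacent vertices."""
--     nvx = nx + 1
--     verts = list(range(nx + 1))
--     verts += [(j + 1) * nvx + nx for j in range(ny)]
--     verts += [ny * nvx + i for i in range(nx - 1, -1, -1)]
--     verts += [j * nvx for j in range(ny - 1, -1, -1)]
--     return list(zip(verts, verts[1:]))
-- ===== Notes on version B (the rewrite author's own statement) =====
-- stated objective: simpler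
-- what changed: B builds the ordered perimeter vertex path once (four range segments) and pairs adjacent vertices with zip, instead of A's four loops each emitting edge pairs directly.
-- outside the precondition, e.g. on get_boundary_edges(1, -1): A returns [(0, 1), (-1, -2)], B returns [(0, 1), (1, -2)]
import Mathlib
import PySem

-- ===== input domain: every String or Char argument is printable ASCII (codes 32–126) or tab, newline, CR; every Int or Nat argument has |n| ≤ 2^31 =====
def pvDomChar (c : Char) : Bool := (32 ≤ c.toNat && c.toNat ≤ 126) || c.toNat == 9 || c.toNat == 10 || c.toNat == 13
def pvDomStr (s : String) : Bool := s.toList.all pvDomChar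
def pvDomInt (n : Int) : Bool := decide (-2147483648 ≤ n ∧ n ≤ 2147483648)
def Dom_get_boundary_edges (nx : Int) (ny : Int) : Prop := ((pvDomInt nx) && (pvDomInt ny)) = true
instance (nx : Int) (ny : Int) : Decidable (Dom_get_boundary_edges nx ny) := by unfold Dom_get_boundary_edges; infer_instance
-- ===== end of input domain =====

-- B builds the ordered perimeter vertex path once and pairs adjacent vertices with zip,
-- instead of A's four loops each emitting edge pairs directly (objective: simpler decomposition).


-- ===== PORT A =====
def get_boundary_edges (nx : Int) (ny : Int) : List (Int × Int) :=
  let nvx := nx + 1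
  let be1 := (PySem.List.pyRange 0 nx 1).foldl (fun acc i => acc ++ [(i, i + 1)]) []
  let be2 := (PySem.List.pyRange 0 ny 1).foldl
      (fun acc j => acc ++ [(j * nvx + nx, (j + 1) * nvx + nx)]) be1
  let be3 := (PySem.List.pyRange nx 0 (-1)).foldl
      (fun acc i => acc ++ [(ny * nvx + i, ny * nvx + i - 1)]) be2
  (PySem.List.pyRange ny 0 (-1)).foldl
      (fun acc j => acc ++ [(j * nvx, (j - 1) * nvx)]) be3

-- ===== PORT B =====
def get_boundary_edges_alt (nx : Int) (ny : Int) : List (Int × Int) :=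
  let nvx := nx + 1
  let verts := PySem.List.pyRange 0 (nx + 1) 1
      ++ (PySem.List.pyRange 0 ny 1).map (fun j => (j + 1) * nvx + nx)
      ++ (PySem.List.pyRange (nx - 1) (-1) (-1)).map (fun i => ny * nvx + i)
      ++ (PySem.List.pyRange (ny - 1) (-1) (-1)).map (fun j => j * nvx)
  verts.zip (PySem.List.slice verts (some 1) none)

-- ===== PRECONDITION & SPEC =====
-- Pre_ excludes negative grid sizes: a quad grid with a negative number of cells is outside
-- the function's natural domain, and A's nonempty outputs there are artefacts of its loops.
def Pre_get_boundary_edges (nx : Int) (ny : Int) : Prop := 0 ≤ nx ∧ 0 ≤ ny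
instance (nx : Int) (ny : Int) : Decidable (Pre_get_boundary_edges nx ny) := by
  unfold Pre_get_boundary_edges; infer_instance
def pvWitness_get_boundary_edges : Int × Int := (4, 4)

def Spec_get_boundary_edges (nx : Int) (ny : Int) (out : List (Int × Int)) : Prop := out = get_boundary_edges_alt nx ny
instance (nx : Int) (ny : Int) (out : List (Int × Int)) : Decidable (Spec_get_boundary_edges nx ny out) := by unfold Spec_get_boundary_edges; infer_instance

-- ===== CLAIM (what is proved, stated in full; the proofs are below) =====
def Claim_equal_get_boundary_edges : Prop := ∀ (nx : Int) (ny : Int), Dom_get_boundary_edges nx ny → Pre_get_boundary_edges nx ny → Spec_get_boundary_edges nx ny (get_boundary_edges nx ny)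

-- ===== LEMMAS AND PROOFS =====

/-- Adjacent-pair walk of a path continuing after start vertex `x`. -/
def pvPairsFrom : Int → List Int → List (Int × Int)
  | _, [] => []
  | x, y :: t => (x, y) :: pvPairsFrom y t

/-- One arithmetic segment of edges: start `a`, step `d`, `k` edges. -/
def pvSeg (a d : Int) (k : Nat) : List (Int × Int) :=
  (List.range k).map (fun i : Nat => (a + d * i, a + d * ((i : Int) + 1)))

/-- The `k` vertices after the start `a` of an arithmetic segment with step `d`. -/
def pvAseg (a d : Int) (k : Nat) : List Int :=
  (List.range k).map (fun i : Nat => a + d * ((i : Int) + 1))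

/-- Canonical form of the perimeter edge list for nonnegative sizes. -/
def pvCanon (n m : Nat) : List (Int × Int) :=
  pvSeg 0 1 n ++ pvSeg n ((n : Int) + 1) m ++
  pvSeg ((m : Int) * ((n : Int) + 1) + n) (-1) n ++
  pvSeg ((m : Int) * ((n : Int) + 1)) (-(((n : Int)) + 1)) m

theorem pv_zip_tail (x : Int) (l : List Int) : (x :: l).zip l = pvPairsFrom x l := by
  induction l generalizing x with
  | nil => rfl
  | cons y t ih => simp [List.zip, pvPairsFrom, ← ih y]

theorem pv_pf_append (x : Int) (l1 l2 : List Int) :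
    pvPairsFrom x (l1 ++ l2) = pvPairsFrom x l1 ++ pvPairsFrom (l1.getLastD x) l2 := by
  induction l1 generalizing x with
  | nil => rfl
  | cons y t ih =>
    rw [List.cons_append]
    show (x, y) :: pvPairsFrom y (t ++ l2) = _
    rw [ih y, show (y :: t).getLastD x = t.getLastD y from by cases t <;> simp [List.getLastD]]
    rfl

theorem pv_last_aseg (a d : Int) (k : Nat) : (pvAseg a d k).getLastD a = a + d * k := by
  cases k with
  | zero => simp [pvAseg]
  | succ k =>
    unfold pvAseg
    rw [List.range_succ, List.map_append]
    simp only [List.map_cons, List.map_nil, List.getLastD_concat]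
    push_cast; ring

theorem pv_pf_arith : ∀ (k : Nat) (a d : Int),
    pvPairsFrom a (pvAseg a d k) = pvSeg a d k := by
  intro k
  induction k with
  | zero => intro a d; rfl
  | succ k ih =>
    intro a d
    unfold pvAseg
    rw [List.range_succ_eq_map]
    simp only [List.map_cons, List.map_map, pvPairsFrom, Nat.cast_zero]
    have h1 : ((List.range k).map ((fun i : Nat => a + d * ((i : Int) + 1)) ∘ (· + 1)))
        = pvAseg (a + d) d k := by
      apply List.map_congr_left; intro i _; simp [Function.comp, pvAseg]; ring
    rw [h1, show a + d * (0 + 1) = a + d from by ring, ih (a + d) d]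
    unfold pvSeg
    rw [List.range_succ_eq_map]
    simp only [List.map_cons, List.map_map, Nat.cast_zero]
    refine List.cons_eq_cons.mpr ⟨?_, ?_⟩
    · refine Prod.ext ?_ ?_ <;> push_cast <;> ring
    · apply List.map_congr_left; intro i _; simp only [Function.comp]
      refine Prod.ext ?_ ?_ <;> push_cast <;> ring

theorem pv_A_eq_canon (n m : Nat) :
    get_boundary_edges (n : Int) (m : Int) = pvCanon n m := by
  unfold get_boundary_edges pvCanon pvSeg
  simp only [PySem.List.foldl_append_singleton_eq_map, PySem.List.pyRange_one,
    PySem.List.pyRange_neg_one, List.map_map, List.nil_append, List.append_assoc,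
    Int.sub_zero, Int.toNat_natCast]
  congr 1
  · apply List.map_congr_left; intro i _
    simp only [Function.comp]; refine Prod.ext ?_ ?_ <;> push_cast <;> ring
  congr 1
  · apply List.map_congr_left; intro i _
    simp only [Function.comp]; refine Prod.ext ?_ ?_ <;> push_cast <;> ring
  congr 1
  · apply List.map_congr_left; intro i _
    simp only [Function.comp]; refine Prod.ext ?_ ?_ <;> push_cast <;> ring
  · apply List.map_congr_left; intro i _
    simp only [Function.comp]; refine Prod.ext ?_ ?_ <;> push_cast <;> ring

theorem pv_B_eq_canon (n m : Nat) :
    get_boundary_edges_alt (n : Int) (m : Int) = pvCanon n m := by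
  unfold get_boundary_edges_alt
  have e1 : PySem.List.pyRange 0 ((n : Int) + 1) 1 = 0 :: pvAseg 0 1 n := by
    rw [PySem.List.pyRange_one]
    have h : ((n : Int) + 1 - 0).toNat = n + 1 := by omega
    rw [h, List.range_succ_eq_map]
    simp only [List.map_cons, List.map_map, Nat.cast_zero, Int.add_zero]
    refine List.cons_eq_cons.mpr ⟨rfl, ?_⟩
    apply List.map_congr_left; intro i _; simp [Function.comp, pvAseg]
  have e2 : (PySem.List.pyRange 0 (m : Int) 1).map
      (fun j => (j + 1) * ((n : Int) + 1) + (n : Int)) = pvAseg n ((n : Int) + 1) m := by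
    rw [PySem.List.pyRange_one]
    have h : ((m : Int) - 0).toNat = m := by omega
    rw [h, List.map_map]
    apply List.map_congr_left; intro i _; simp [Function.comp, pvAseg]; push_cast; ring
  have e3 : (PySem.List.pyRange ((n : Int) - 1) (-1) (-1)).map
      (fun i => (m : Int) * ((n : Int) + 1) + i)
      = pvAseg ((m : Int) * ((n : Int) + 1) + n) (-1) n := by
    rw [PySem.List.pyRange_neg_one]
    have h : ((n : Int) - 1 - (-1)).toNat = n := by omega
    rw [h, List.map_map]
    apply List.map_congr_left; intro i _; simp [Function.comp, pvAseg]; ring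
  have e4 : (PySem.List.pyRange ((m : Int) - 1) (-1) (-1)).map
      (fun j => j * ((n : Int) + 1))
      = pvAseg ((m : Int) * ((n : Int) + 1)) (-(((n : Int)) + 1)) m := by
    rw [PySem.List.pyRange_neg_one]
    have h : ((m : Int) - 1 - (-1)).toNat = m := by omega
    rw [h, List.map_map]
    apply List.map_congr_left; intro i _; simp [Function.comp, pvAseg]; push_cast; ring
  simp only [e1, e2, e3, e4, List.cons_append, PySem.List.slice_from_one, List.tail_cons,
    pv_zip_tail]
  simp only [List.append_assoc]
  rw [pv_pf_append 0 (pvAseg 0 1 n), pv_last_aseg]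
  rw [show (0 : Int) + 1 * n = (n : Int) from by ring]
  rw [pv_pf_append (n : Int) (pvAseg (↑n) (↑n + 1) m), pv_last_aseg]
  rw [show (n : Int) + (↑n + 1) * ↑m = (m : Int) * (↑n + 1) + ↑n from by ring]
  rw [pv_pf_append _ (pvAseg (↑m * (↑n + 1) + ↑n) (-1) n), pv_last_aseg]
  rw [show (m : Int) * (↑n + 1) + ↑n + -1 * ↑n = (m : Int) * (↑n + 1) from by ring]
  simp only [pv_pf_arith, pvCanon, List.append_assoc]

-- ===== VERDICT (by name: the statement is the Claim_ definition above) =====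
theorem get_boundary_edges_spec : Claim_equal_get_boundary_edges := by
  intro nx ny _ hpre
  obtain ⟨n, rfl⟩ := Int.eq_ofNat_of_zero_le hpre.1
  obtain ⟨m, rfl⟩ := Int.eq_ofNat_of_zero_le hpre.2
  unfold Spec_get_boundary_edges
  rw [pv_A_eq_canon, pv_B_eq_canon]
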